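-- pv_equiv track=rewrite | github.com/rrickfox/AdventOfCode | 2021/19/19.2.py | transform
-- ===== SOURCE A (Python) =====
-- def rotate(beacon, deg_inc):
-- 	if deg_inc == 0:
-- 		return (beacon[0], beacon[1], beacon[2])
-- 	elif deg_inc == 1:
-- 		return (-beacon[1], beacon[0], beacon[2])
-- 	elif deg_inc == 2:
-- 		return (-beacon[0], -beacon[1], beacon[2])
-- 	elif deg_inc == 3:
-- 		return (beacon[1], -beacon[0], beacon[2])
--
-- def transform(beacons: set):
-- 	ret = [{rotate(beacon, i) for beacon in beacons} for i in range(4)] # z is up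
-- 	ret += [{rotate((beacon[0], beacon[2], -beacon[1]), i) for beacon in beacons} for i in range(4)] # z is back
-- 	ret += [{rotate((beacon[0], -beacon[2], beacon[1]), i) for beacon in beacons} for i in range(4)] # z is front
-- 	ret += [{rotate((-beacon[2], beacon[1], beacon[0]), i) for beacon in beacons} for i in range(4)] # z is left
-- 	ret += [{rotate((beacon[2], beacon[1], -beacon[0]), i) for beacon in beacons} for i in range(4)] # z is right
-- 	ret += [{rotate((-beacon[0], beacon[1], -beacon[2]), i) for beacon in beacons} for i in range(4)] # z is down
-- 	return ret
-- ===== SOURCE B (Python) =====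
-- # 24 precomputed rotation matrices (row-major 3x3), in the same order A emits them.
-- MATRICES = [
--     (1, 0, 0, 0, 1, 0, 0, 0, 1), (0, -1, 0, 1, 0, 0, 0, 0, 1),
--     (-1, 0, 0, 0, -1, 0, 0, 0, 1), (0, 1, 0, -1, 0, 0, 0, 0, 1),
--     (1, 0, 0, 0, 0, 1, 0, -1, 0), (0, 0, -1, 1, 0, 0, 0, -1, 0),
--     (-1, 0, 0, 0, 0, -1, 0, -1, 0), (0, 0, 1, -1, 0, 0, 0, -1, 0),
--     (1, 0, 0, 0, 0, -1, 0, 1, 0), (0, 0, 1, 1, 0, 0, 0, 1, 0),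
--     (-1, 0, 0, 0, 0, 1, 0, 1, 0), (0, 0, -1, -1, 0, 0, 0, 1, 0),
--     (0, 0, -1, 0, 1, 0, 1, 0, 0), (0, -1, 0, 0, 0, -1, 1, 0, 0),
--     (0, 0, 1, 0, -1, 0, 1, 0, 0), (0, 1, 0, 0, 0, 1, 1, 0, 0),
--     (0, 0, 1, 0, 1, 0, -1, 0, 0), (0, -1, 0, 0, 0, 1, -1, 0, 0),
--     (0, 0, -1, 0, -1, 0, -1, 0, 0), (0, 1, 0, 0, 0, -1, -1, 0, 0),
--     (-1, 0, 0, 0, 1, 0, 0, 0, -1), (0, -1, 0, -1, 0, 0, 0, 0, -1),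
--     (1, 0, 0, 0, -1, 0, 0, 0, -1), (0, 1, 0, 1, 0, 0, 0, 0, -1),
-- ]
--
-- def transform(beacons: set):
--     return [{(a*x + b*y + c*z, d*x + e*y + f*z, g*x + h*y + i*z)
--              for (x, y, z) in beacons}
--             for (a, b, c, d, e, f, g, h, i) in MATRICES]
-- ===== Notes on version B (the rewrite author's own statement) =====
-- stated objective: idiomatic
-- what changed: Replaces the branching rotate helper plus six hand-written reorientation comprehensions with a single flat pass over a precomputed table of the 24 integer 3x3 rotation matrices (in A's exact order), applying each matrix to every beacon.
import Mathlib
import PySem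

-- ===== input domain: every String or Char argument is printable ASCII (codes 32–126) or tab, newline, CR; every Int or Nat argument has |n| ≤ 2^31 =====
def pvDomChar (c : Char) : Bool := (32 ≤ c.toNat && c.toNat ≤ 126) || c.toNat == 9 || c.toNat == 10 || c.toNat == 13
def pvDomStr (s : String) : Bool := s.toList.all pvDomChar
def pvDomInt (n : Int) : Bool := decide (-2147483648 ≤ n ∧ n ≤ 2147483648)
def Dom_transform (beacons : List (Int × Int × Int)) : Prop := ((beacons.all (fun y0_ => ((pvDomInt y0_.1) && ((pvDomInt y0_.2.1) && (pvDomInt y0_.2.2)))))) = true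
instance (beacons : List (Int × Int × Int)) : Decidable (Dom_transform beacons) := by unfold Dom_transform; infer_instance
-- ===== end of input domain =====

-- B replaces the branching rotate helper and six hand-written reorientation blocks with one
-- flat pass over a precomputed table of the 24 integer 3x3 rotation matrices (idiomatic).

-- ===== PORT A =====
-- rotate is only ever called with deg_inc in 0..3; the final else is the deg_inc == 3 branch
-- (Python's implicit None for other values is unreachable in transform).
def rotate (beacon : Int × Int × Int) (deg_inc : Int) : Int × Int × Int :=
  if deg_inc = 0 then (beacon.1, beacon.2.1, beacon.2.2)
  else if deg_inc = 1 then (-beacon.2.1, beacon.1, beacon.2.2)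
  else if deg_inc = 2 then (-beacon.1, -beacon.2.1, beacon.2.2)
  else (beacon.2.1, -beacon.1, beacon.2.2)

def transform (beacons : List (Int × Int × Int)) : List (List (Int × Int × Int)) :=
  let ret := (PySem.List.pyRange 0 4 1).map (fun i =>
    PySem.Set.ofList (beacons.map (fun b => rotate b i)))
  let ret := ret ++ (PySem.List.pyRange 0 4 1).map (fun i =>
    PySem.Set.ofList (beacons.map (fun b => rotate (b.1, b.2.2, -b.2.1) i)))
  let ret := ret ++ (PySem.List.pyRange 0 4 1).map (fun i =>
    PySem.Set.ofList (beacons.map (fun b => rotate (b.1, -b.2.2, b.2.1) i)))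
  let ret := ret ++ (PySem.List.pyRange 0 4 1).map (fun i =>
    PySem.Set.ofList (beacons.map (fun b => rotate (-b.2.2, b.2.1, b.1) i)))
  let ret := ret ++ (PySem.List.pyRange 0 4 1).map (fun i =>
    PySem.Set.ofList (beacons.map (fun b => rotate (b.2.2, b.2.1, -b.1) i)))
  let ret := ret ++ (PySem.List.pyRange 0 4 1).map (fun i =>
    PySem.Set.ofList (beacons.map (fun b => rotate (-b.1, b.2.1, -b.2.2) i)))
  ret

-- ===== PORT B =====
def pvMatrices : List (Int × Int × Int × Int × Int × Int × Int × Int × Int) := [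
  ((1 : Int), 0, 0, 0, 1, 0, 0, 0, 1),
  ((0 : Int), -1, 0, 1, 0, 0, 0, 0, 1),
  ((-1 : Int), 0, 0, 0, -1, 0, 0, 0, 1),
  ((0 : Int), 1, 0, -1, 0, 0, 0, 0, 1),
  ((1 : Int), 0, 0, 0, 0, 1, 0, -1, 0),
  ((0 : Int), 0, -1, 1, 0, 0, 0, -1, 0),
  ((-1 : Int), 0, 0, 0, 0, -1, 0, -1, 0),
  ((0 : Int), 0, 1, -1, 0, 0, 0, -1, 0),
  ((1 : Int), 0, 0, 0, 0, -1, 0, 1, 0),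
  ((0 : Int), 0, 1, 1, 0, 0, 0, 1, 0),
  ((-1 : Int), 0, 0, 0, 0, 1, 0, 1, 0),
  ((0 : Int), 0, -1, -1, 0, 0, 0, 1, 0),
  ((0 : Int), 0, -1, 0, 1, 0, 1, 0, 0),
  ((0 : Int), -1, 0, 0, 0, -1, 1, 0, 0),
  ((0 : Int), 0, 1, 0, -1, 0, 1, 0, 0),
  ((0 : Int), 1, 0, 0, 0, 1, 1, 0, 0),
  ((0 : Int), 0, 1, 0, 1, 0, -1, 0, 0),
  ((0 : Int), -1, 0, 0, 0, 1, -1, 0, 0),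
  ((0 : Int), 0, -1, 0, -1, 0, -1, 0, 0),
  ((0 : Int), 1, 0, 0, 0, -1, -1, 0, 0),
  ((-1 : Int), 0, 0, 0, 1, 0, 0, 0, -1),
  ((0 : Int), -1, 0, -1, 0, 0, 0, 0, -1),
  ((1 : Int), 0, 0, 0, -1, 0, 0, 0, -1),
  ((0 : Int), 1, 0, 1, 0, 0, 0, 0, -1)]

def transform_alt (beacons : List (Int × Int × Int)) : List (List (Int × Int × Int)) :=
  pvMatrices.map (fun m =>
    PySem.Set.ofList (beacons.map (fun p =>
      (m.1 * p.1 + m.2.1 * p.2.1 + m.2.2.1 * p.2.2,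
       m.2.2.2.1 * p.1 + m.2.2.2.2.1 * p.2.1 + m.2.2.2.2.2.1 * p.2.2,
       m.2.2.2.2.2.2.1 * p.1 + m.2.2.2.2.2.2.2.1 * p.2.1 + m.2.2.2.2.2.2.2.2 * p.2.2))))

-- ===== PRECONDITION & SPEC =====
def Spec_transform (beacons : List (Int × Int × Int)) (out : List (List (Int × Int × Int))) : Prop := out = transform_alt beacons
instance (beacons : List (Int × Int × Int)) (out : List (List (Int × Int × Int))) : Decidable (Spec_transform beacons out) := by unfold Spec_transform; infer_instance

-- ===== CLAIM (what is proved, stated in full; the proofs are below) =====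
def Claim_equal_transform : Prop := ∀ (beacons : List (Int × Int × Int)), Dom_transform beacons → Spec_transform beacons (transform beacons)

-- ===== LEMMAS AND PROOFS =====
theorem ofList_map_congr (bs : List (Int × Int × Int))
    (f g : Int × Int × Int → Int × Int × Int) (h : ∀ p ∈ bs, f p = g p) :
    PySem.Set.ofList (bs.map f) = PySem.Set.ofList (bs.map g) := by
  rw [List.map_congr_left h]

theorem pyRange04 : PySem.List.pyRange 0 4 1 = [0, 1, 2, 3] := by decide

theorem transform_eq_alt (bs : List (Int × Int × Int)) : transform bs = transform_alt bs := by
  unfold transform transform_alt pvMatrices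
  rw [pyRange04]
  simp only [List.map_cons, List.map_nil, List.cons_append, List.nil_append, List.cons.injEq,
    and_true]
  and_intros <;>
    · apply ofList_map_congr
      rintro ⟨x, y, z⟩ -
      norm_num [rotate]

-- ===== VERDICT (by name: the statement is the Claim_ definition above) =====
theorem transform_spec : Claim_equal_transform := by
  intro bs _
  unfold Spec_transform
  exact transform_eq_alt bs
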